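-- pv_equiv track=rewrite | github.com/Polete25/Python | Python 100Ex/Ej100.py | eltseparado
-- ===== SOURCE A (Python) =====
-- def eltseparado(L):
--     n0 = L.count(0)
--     n1 = L.count(1)
--     L = []
--     i = 0
--     while i < n0:
--         L.append(0)
--         i += 1
--     i = 0
--     while i < n1:
--         L.append(1)
--         i += 1
--
--     return L
-- ===== SOURCE B (Python) =====
-- def eltseparado(L):
--     zeros = []
--     ones = []
--     for x in L:
--         if x == 0:
--             zeros.append(0)
--         elif x == 1:
--             ones.append(1)
--     return zeros + ones
-- ===== Notes on version B (the rewrite author's own statement) =====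
-- stated objective: simpler
-- what changed: One single pass partitioning elements into zeros/ones lists, instead of two count scans followed by two while-loops that regenerate the elements.
import Mathlib
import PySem

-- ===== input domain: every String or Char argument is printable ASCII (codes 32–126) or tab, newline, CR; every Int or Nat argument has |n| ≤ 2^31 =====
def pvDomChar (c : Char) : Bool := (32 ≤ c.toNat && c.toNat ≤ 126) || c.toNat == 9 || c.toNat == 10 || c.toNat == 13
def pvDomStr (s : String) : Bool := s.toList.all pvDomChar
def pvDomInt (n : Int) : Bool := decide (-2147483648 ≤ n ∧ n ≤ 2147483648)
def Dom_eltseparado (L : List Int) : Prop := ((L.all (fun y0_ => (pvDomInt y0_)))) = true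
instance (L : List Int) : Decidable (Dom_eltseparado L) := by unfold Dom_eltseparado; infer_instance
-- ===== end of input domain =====

-- B replaces A's two count scans + two rebuilding while-loops by one pass that partitions
-- the elements into a zeros list and a ones list (objective: simpler).

-- ===== PORT A =====
-- the 'while i < n: L.append(v); i += 1' loop of A
def pvWhileAppend (i n v : Int) (acc : List Int) : List Int :=
  if i < n then pvWhileAppend (i + 1) n v (acc ++ [v]) else acc
termination_by (n - i).toNat
decreasing_by omega

def eltseparado (L : List Int) : List Int :=
  let n0 : Int := L.count 0
  let n1 : Int := L.count 1
  let L1 := pvWhileAppend 0 n0 0 []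
  pvWhileAppend 0 n1 1 L1

-- ===== PORT B =====
def pvStep (zo : List Int × List Int) (x : Int) : List Int × List Int :=
  if x == 0 then (zo.1 ++ [0], zo.2)
  else if x == 1 then (zo.1, zo.2 ++ [1])
  else zo

def eltseparado_alt (L : List Int) : List Int :=
  let p := L.foldl pvStep ([], [])
  p.1 ++ p.2

-- ===== PRECONDITION & SPEC =====
def Spec_eltseparado (L : List Int) (out : List Int) : Prop := out = eltseparado_alt L
instance (L : List Int) (out : List Int) : Decidable (Spec_eltseparado L out) := by unfold Spec_eltseparado; infer_instance

-- ===== CLAIM (what is proved, stated in full; the proofs are below) =====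
def Claim_equal_eltseparado : Prop := ∀ (L : List Int), Dom_eltseparado L → Spec_eltseparado L (eltseparado L)

-- ===== LEMMAS AND PROOFS =====
theorem pvWhileAppend_eq (i n v : Int) (acc : List Int) :
    pvWhileAppend i n v acc = acc ++ List.replicate (n - i).toNat v := by
  by_cases h : i < n
  · have hk : (n - i).toNat = (n - (i + 1)).toNat + 1 := by omega
    rw [pvWhileAppend, if_pos h, pvWhileAppend_eq (i + 1) n v (acc ++ [v]), hk]
    simp [List.replicate_succ]
  · rw [pvWhileAppend, if_neg h]
    have : (n - i).toNat = 0 := by omega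
    simp [this]
termination_by (n - i).toNat
decreasing_by omega

theorem foldl_partition_eq (L : List Int) (z o : List Int) :
    L.foldl pvStep (z, o)
    = (z ++ List.replicate (L.count 0) 0, o ++ List.replicate (L.count 1) 1) := by
  induction L generalizing z o with
  | nil => simp
  | cons x xs ih =>
    rw [List.foldl_cons]
    by_cases h0 : x = 0
    · subst h0
      rw [show pvStep (z, o) 0 = (z ++ [0], o) from rfl, ih]
      simp [List.replicate_succ]
    · by_cases h1 : x = 1
      · subst h1
        rw [show pvStep (z, o) 1 = (z, o ++ [1]) from rfl, ih]
        simp [List.replicate_succ]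
      · rw [show pvStep (z, o) x = (z, o) from by simp [pvStep, h0, h1], ih]
        simp [h0, h1]

-- ===== VERDICT (by name: the statement is the Claim_ definition above) =====
theorem eltseparado_spec : Claim_equal_eltseparado := by
  intro L _
  unfold Spec_eltseparado eltseparado eltseparado_alt
  rw [foldl_partition_eq]
  simp [pvWhileAppend_eq]
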